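-- pv_equiv track=rewrite | github.com/rlatjsqls/coding_test | programmers_lv2/전력망둘로나누기.py | solution
-- ===== SOURCE A (Python) =====
-- from collections import deque
--
-- def func(node, dict_route):
--     que = deque([node])
--     visited = [node]    #연결된 노드들
--
--     #잘렸을때 아무곳도 연결 안되어있는 경우
--     if que[0] not in dict_route:
--         return 1
--
--     while que:
--         temp = dict_route[que.popleft()]
--         for i in temp:
--             if i not in visited:
--                 visited.append(i)
--                 que.append(i)
--
--     return len(visited)
--
-- def solution(n, wires):
--     answer = n
--
--     for idx in range(len(wires)):
--         temp = wires[:]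
--         #문제에 중복된 연결이 주어지지 않아서 wires의 원소들을 한번씩 끊는 용도로 사용
--         x, y = temp.pop(idx)
--         #끊어진 상황에서 연결된 상태를 가지고 있는 딕셔너리
--         dict_route = {}
--
--         for wire in temp:
--             if wire[0] in dict_route:
--                 dict_route[wire[0]].append(wire[1])
--             else:
--                 dict_route[wire[0]] =  [wire[1]]
--             if wire[1] in dict_route:
--                 dict_route[wire[1]].append(wire[0])
--             else:
--                 dict_route[wire[1]] =  [wire[0]]
--
--         if abs(func(x, dict_route) - func(y, dict_route)) < answer:
--             answer = abs(func(x, dict_route) - func(y, dict_route))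
--
--     return answer
-- ===== SOURCE B (Python) =====
-- def _comp_size(start, edges):
--     comp = {start}
--     while True:
--         new = set()
--         for a, b in edges:
--             if a in comp and b not in comp:
--                 new.add(b)
--             if b in comp and a not in comp:
--                 new.add(a)
--         if not new:
--             break
--         comp |= new
--     return len(comp)
--
-- def solution(n, wires):
--     best = n
--     prev = []
--     rem = list(wires)
--     while rem:
--         x, y = rem.pop(0)
--         rest = prev + rem
--         d = abs(_comp_size(x, rest) - _comp_size(y, rest))
--         if d < best:
--             best = d
--         prev.append((x, y))
--     return best
-- ===== Notes on version B (the rewrite author's own statement) =====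
-- stated objective: faster
-- what changed: Per removed edge, component sizes are computed by round-based set saturation over the raw edge list (each round adds all neighbours of the current component via Python-set membership) instead of A's adjacency-dict BFS whose 'i not in visited' scans an O(V) list; the outer loop walks the wire list with a prev/rem split instead of indexing, copying and pop(idx).
import Mathlib
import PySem

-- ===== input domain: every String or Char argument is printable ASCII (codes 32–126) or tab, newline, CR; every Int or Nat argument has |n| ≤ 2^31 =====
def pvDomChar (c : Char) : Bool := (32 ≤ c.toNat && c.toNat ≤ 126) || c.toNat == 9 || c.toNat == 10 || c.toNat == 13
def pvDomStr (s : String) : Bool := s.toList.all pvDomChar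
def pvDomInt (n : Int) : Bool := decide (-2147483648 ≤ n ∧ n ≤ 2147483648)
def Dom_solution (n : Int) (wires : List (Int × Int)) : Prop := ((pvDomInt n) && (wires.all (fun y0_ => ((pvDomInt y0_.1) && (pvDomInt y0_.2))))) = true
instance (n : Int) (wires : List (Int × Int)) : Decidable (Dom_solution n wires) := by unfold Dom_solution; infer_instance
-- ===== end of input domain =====

-- B replaces A's per-edge adjacency-dict BFS (deque + linear-scan visited list) by a
-- round-based set-saturation reachability over the raw edge list, and the index/copy/pop
-- outer loop by a prev/rem walk of the wire list; alternative algorithm, same values.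

-- ===== PORT A =====
-- dict_route building loop of solution (for wire in temp: ...)
def pvBuildStep (d : PySem.Dict Int (List Int)) (w : Int × Int) : PySem.Dict Int (List Int) :=
  let d1 := match d.get? w.1 with
    | some l => d.insert w.1 (l ++ [w.2])
    | none   => d.insert w.1 [w.2]
  match d1.get? w.2 with
  | some l => d1.insert w.2 (l ++ [w.1])
  | none   => d1.insert w.2 [w.1]

def pvBuildDict (temp : List (Int × Int)) : PySem.Dict Int (List Int) :=
  temp.foldl pvBuildStep PySem.Dict.empty

-- inner 'for i in temp: if i not in visited: ...' of func
def pvBfsStep (visited que : List Int) (temp : List Int) : List Int × List Int :=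
  temp.foldl (fun s i => if i ∈ s.1 then s else (s.1 ++ [i], s.2 ++ [i])) (visited, que)

-- 'while que:' loop of func; fuel is only a totality guard (proved never exhausted)
def pvBfsLoop (dict : PySem.Dict Int (List Int)) : Nat → List Int → List Int → List Int
  | 0, _, visited => visited
  | _+1, [], visited => visited
  | fuel+1, q :: que, visited =>
      let s := pvBfsStep visited que (dict.getD q [])
      pvBfsLoop dict fuel s.2 s.1

-- func(node, dict_route); extra fuel argument is a totality guard only
def pvFunc (node : Int) (dict : PySem.Dict Int (List Int)) (fuel : Nat) : Int :=
  if dict.contains node = false then 1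
  else ((pvBfsLoop dict fuel [node] [node]).length : Int)

def solution (n : Int) (wires : List (Int × Int)) : Int :=
  (PySem.List.pyRange 0 (wires.length : Int)).foldl (fun answer idx =>
    match PySem.List.pop? wires idx with
    | none => answer   -- unreachable: idx ∈ range(len(wires))
    | some ((x, y), temp) =>
        let dict := pvBuildDict temp
        if |pvFunc x dict (1 + 2 * temp.length) - pvFunc y dict (1 + 2 * temp.length)| < answer
        then |pvFunc x dict (1 + 2 * temp.length) - pvFunc y dict (1 + 2 * temp.length)|
        else answer) n

-- ===== PORT B =====
-- the 'for a, b in edges' round of _comp_size, building the set `new`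
def pvNewNodes (comp : PySem.Set Int) (edges : List (Int × Int)) : PySem.Set Int :=
  edges.foldl (fun acc ab =>
    let acc1 := if ab.1 ∈ comp ∧ ab.2 ∉ comp then PySem.Set.add acc ab.2 else acc
    if ab.2 ∈ comp ∧ ab.1 ∉ comp then PySem.Set.add acc1 ab.1 else acc1) PySem.Set.empty

-- 'while True' saturation loop of _comp_size; fuel is only a totality guard
def pvSatLoop (edges : List (Int × Int)) : Nat → PySem.Set Int → PySem.Set Int
  | 0, comp => comp
  | fuel+1, comp =>
      let nw := pvNewNodes comp edges
      if nw = PySem.Set.empty then comp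
      else pvSatLoop edges fuel (PySem.Set.union comp nw)

def pvCompSize (start : Int) (edges : List (Int × Int)) : Int :=
  ((pvSatLoop edges (2 * edges.length + 1) (PySem.Set.ofList [start])).length : Int)

def pvAltLoop (best : Int) (prev : List (Int × Int)) : List (Int × Int) → Int
  | [] => best
  | (x, y) :: rem =>
      let rest := prev ++ rem
      let d := |pvCompSize x rest - pvCompSize y rest|
      pvAltLoop (if d < best then d else best) (prev ++ [(x, y)]) rem

def solution_alt (n : Int) (wires : List (Int × Int)) : Int := pvAltLoop n [] wires

-- ===== PRECONDITION & SPEC =====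
def Spec_solution (n : Int) (wires : List (Int × Int)) (out : Int) : Prop := out = solution_alt n wires
instance (n : Int) (wires : List (Int × Int)) (out : Int) : Decidable (Spec_solution n wires out) := by unfold Spec_solution; infer_instance

-- ===== CLAIM (what is proved, stated in full; the proofs are below) =====
def Claim_equal_solution : Prop := ∀ (n : Int) (wires : List (Int × Int)), Dom_solution n wires → Spec_solution n wires (solution n wires)

-- ===== LEMMAS AND PROOFS =====

-- the undirected adjacency relation of an edge list, its endpoint and neighbour lists
def pvAdj (edges : List (Int × Int)) (u v : Int) : Prop := (u, v) ∈ edges ∨ (v, u) ∈ edges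

def pvEps (edges : List (Int × Int)) : List Int := edges.flatMap (fun ab => [ab.1, ab.2])

def pvNbrs (edges : List (Int × Int)) (v : Int) : List Int :=
  edges.flatMap (fun ab => (if ab.1 = v then [ab.2] else []) ++ (if ab.2 = v then [ab.1] else []))

def pvReach (edges : List (Int × Int)) (x v : Int) : Prop :=
  Relation.ReflTransGen (pvAdj edges) x v

-- a list that enumerates (without repetition) exactly the nodes reachable from x
def pvGood (edges : List (Int × Int)) (x : Int) (V : List Int) : Prop :=
  V.Nodup ∧ x ∈ V ∧ (∀ v ∈ V, pvReach edges x v) ∧ ∀ u ∈ V, ∀ w, pvAdj edges u w → w ∈ V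

def pvCap (x : Int) (edges : List (Int × Int)) : Nat := (x :: pvEps edges).toFinset.card

lemma pvAdj_mem_eps {edges : List (Int × Int)} {u v : Int} (h : pvAdj edges u v) :
    v ∈ pvEps edges := by
  simp only [pvEps, List.mem_flatMap]
  rcases h with h | h
  · exact ⟨(u, v), h, by simp⟩
  · exact ⟨(v, u), h, by simp⟩

lemma pvAdj_mem_eps_left {edges : List (Int × Int)} {u v : Int} (h : pvAdj edges u v) :
    u ∈ pvEps edges := by
  simp only [pvEps, List.mem_flatMap]
  rcases h with h | h
  · exact ⟨(u, v), h, by simp⟩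
  · exact ⟨(v, u), h, by simp⟩

lemma pvLength_eps (edges : List (Int × Int)) : (pvEps edges).length = 2 * edges.length := by
  induction edges with
  | nil => simp [pvEps]
  | cons ab t ih =>
      simp only [pvEps, List.flatMap_cons, List.length_append] at *
      simp [ih]
      omega

lemma pvMem_nbrs {edges : List (Int × Int)} {v w : Int} :
    w ∈ pvNbrs edges v ↔ pvAdj edges v w := by
  simp only [pvNbrs, List.mem_flatMap, pvAdj]
  constructor
  · rintro ⟨ab, hab, hm⟩
    rcases List.mem_append.1 hm with h | h
    · by_cases h1 : ab.1 = v
      · simp only [if_pos h1] at h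
        simp only [List.mem_singleton] at h
        subst h; subst h1
        exact Or.inl (by simpa using hab)
      · simp [h1] at h
    · by_cases h2 : ab.2 = v
      · simp only [if_pos h2] at h
        simp only [List.mem_singleton] at h
        subst h; subst h2
        exact Or.inr (by simpa using hab)
      · simp [h2] at h
  · rintro (h | h)
    · exact ⟨(v, w), h, by by_cases hwv : w = v <;> simp [hwv]⟩
    · exact ⟨(w, v), h, by by_cases hwv : w = v <;> simp [hwv]⟩

lemma pvNodup_card_le {l m : List Int} (hn : l.Nodup) (hs : ∀ v ∈ l, v ∈ m) :
    l.length ≤ m.toFinset.card := by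
  calc l.length = l.toFinset.card := (List.toFinset_card_of_nodup hn).symm
  _ ≤ m.toFinset.card := by
      apply Finset.card_le_card
      intro a ha
      simp only [List.mem_toFinset] at *
      exact hs a ha

lemma pvGood_mem {edges : List (Int × Int)} {x : Int} {V : List Int} (h : pvGood edges x V)
    (v : Int) : v ∈ V ↔ pvReach edges x v := by
  obtain ⟨-, hx, hsound, hclosed⟩ := h
  constructor
  · exact hsound v
  · intro hr
    induction hr with
    | refl => exact hx
    | tail _ hadj ih => exact hclosed _ ih _ hadj

lemma pvGood_length_eq {edges : List (Int × Int)} {x : Int} {V C : List Int}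
    (hV : pvGood edges x V) (hC : pvGood edges x C) : V.length = C.length := by
  refine List.Perm.length_eq ?_
  exact (List.perm_ext_iff_of_nodup hV.1 hC.1).2
    (fun a => (pvGood_mem hV a).trans (pvGood_mem hC a).symm)

-- dict lemmas
lemma pvStepOne (d : PySem.Dict Int (List Int)) (a b : Int) :
    (match d.get? a with
     | some l => d.insert a (l ++ [b])
     | none   => d.insert a [b]) = d.insert a (d.getD a [] ++ [b]) := by
  rcases h : d.get? a with _ | l
  · simp [PySem.Dict.getD_of_get?_eq_none d [] h]
  · simp [PySem.Dict.getD_of_get?_eq_some d [] h]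

lemma pvBuildStep_eq (d : PySem.Dict Int (List Int)) (ab : Int × Int) :
    pvBuildStep d ab =
      (d.insert ab.1 (d.getD ab.1 [] ++ [ab.2])).insert ab.2
        ((d.insert ab.1 (d.getD ab.1 [] ++ [ab.2])).getD ab.2 [] ++ [ab.1]) := by
  simp only [pvBuildStep]
  rw [pvStepOne, pvStepOne]

lemma pvBuildStep_getD (d : PySem.Dict Int (List Int)) (ab : Int × Int) (v : Int) :
    (pvBuildStep d ab).getD v [] =
      d.getD v [] ++ ((if ab.1 = v then [ab.2] else []) ++ (if ab.2 = v then [ab.1] else [])) := by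
  rw [pvBuildStep_eq]
  simp only [PySem.Dict.getD_insert]
  split_ifs <;> subst_vars <;> simp_all

lemma pvBuild_getD (edges : List (Int × Int)) :
    ∀ (d : PySem.Dict Int (List Int)) (v : Int),
      (edges.foldl pvBuildStep d).getD v [] = d.getD v [] ++ pvNbrs edges v := by
  induction edges with
  | nil => intro d v; simp [pvNbrs]
  | cons ab t ih =>
      intro d v
      rw [List.foldl_cons, ih, pvBuildStep_getD]
      simp [pvNbrs, List.flatMap_cons]

lemma pvBuildStep_contains (d : PySem.Dict Int (List Int)) (ab : Int × Int) (v : Int) :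
    (pvBuildStep d ab).contains v = (v == ab.2 || (v == ab.1 || d.contains v)) := by
  rw [pvBuildStep_eq]
  rw [PySem.Dict.contains_insert, PySem.Dict.contains_insert]

lemma pvBuild_contains (edges : List (Int × Int)) :
    ∀ (d : PySem.Dict Int (List Int)) (v : Int),
      (edges.foldl pvBuildStep d).contains v = (d.contains v || decide (v ∈ pvEps edges)) := by
  induction edges with
  | nil => intro d v; simp [pvEps]
  | cons ab t ih =>
      intro d v
      rw [List.foldl_cons, ih, pvBuildStep_contains]
      have : v ∈ pvEps (ab :: t) ↔ (v = ab.1 ∨ v = ab.2) ∨ v ∈ pvEps t := by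
        simp [pvEps, List.flatMap_cons, or_assoc]
      rcases hd : d.contains v with _ | _ <;>
        by_cases e1 : v = ab.1 <;> by_cases e2 : v = ab.2 <;>
          by_cases et : v ∈ pvEps t <;>
            simp [this, e1, e2, et] <;> simp [pvEps, List.flatMap_cons]

lemma pvDict_getD_mem {edges : List (Int × Int)} {v w : Int} :
    w ∈ (pvBuildDict edges).getD v [] ↔ pvAdj edges v w := by
  unfold pvBuildDict
  rw [pvBuild_getD, PySem.Dict.getD_empty]
  simpa using pvMem_nbrs

lemma pvDict_contains {edges : List (Int × Int)} {v : Int} :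
    (pvBuildDict edges).contains v = true ↔ v ∈ pvEps edges := by
  unfold pvBuildDict
  rw [pvBuild_contains, PySem.Dict.contains_empty]
  simp

-- BFS inner step
lemma pvBfsStep_spec (temp : List Int) : ∀ (visited que : List Int), ∃ nw : List Int,
    (pvBfsStep visited que temp).1 = visited ++ nw ∧
    (pvBfsStep visited que temp).2 = que ++ nw ∧
    nw.Nodup ∧ (∀ i ∈ nw, i ∈ temp ∧ i ∉ visited) ∧ (∀ i ∈ temp, i ∈ visited ++ nw) := by
  induction temp with
  | nil =>
      intro visited que
      exact ⟨[], by simp [pvBfsStep], by simp [pvBfsStep], List.nodup_nil, by simp, by simp⟩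
  | cons i t ih =>
      intro visited que
      by_cases hi : i ∈ visited
      · obtain ⟨nw, h1, h2, h3, h4, h5⟩ := ih visited que
        have e : pvBfsStep visited que (i :: t) = pvBfsStep visited que t := by
          simp [pvBfsStep, hi]
        refine ⟨nw, by rw [e]; exact h1, by rw [e]; exact h2, h3, ?_, ?_⟩
        · exact fun j hj => ⟨List.mem_cons_of_mem _ (h4 j hj).1, (h4 j hj).2⟩
        · intro j hj
          rcases List.mem_cons.1 hj with rfl | hj
          · exact List.mem_append_left _ hi
          · exact h5 j hj
      · obtain ⟨nw, h1, h2, h3, h4, h5⟩ := ih (visited ++ [i]) (que ++ [i])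
        have e : pvBfsStep visited que (i :: t) = pvBfsStep (visited ++ [i]) (que ++ [i]) t := by
          simp [pvBfsStep, hi]
        refine ⟨i :: nw, ?_, ?_, ?_, ?_, ?_⟩
        · rw [e, h1]; simp
        · rw [e, h2]; simp
        · exact List.nodup_cons.2 ⟨fun hin => (h4 i hin).2 (by simp), h3⟩
        · intro j hj
          rcases List.mem_cons.1 hj with rfl | hj
          · exact ⟨by simp, hi⟩
          · obtain ⟨hjt, hjnv⟩ := h4 j hj
            exact ⟨List.mem_cons_of_mem _ hjt, fun hv => hjnv (List.mem_append_left _ hv)⟩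
        · intro j hj
          rcases List.mem_cons.1 hj with rfl | hjt
          · simp
          · have := h5 j hjt
            simp only [List.mem_append, List.mem_cons] at this ⊢
            tauto

-- BFS main invariant
lemma pvBfs_good (edges : List (Int × Int)) (x : Int) :
    ∀ (fuel : Nat) (que visited : List Int),
      visited.Nodup → (∀ q ∈ que, q ∈ visited) → x ∈ visited →
      (∀ v ∈ visited, pvReach edges x v) →
      (∀ u ∈ visited, u ∉ que → ∀ w, pvAdj edges u w → w ∈ visited) →
      (∀ v ∈ visited, v ∈ x :: pvEps edges) →
      que.length + (pvCap x edges - visited.length) ≤ fuel →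
      pvGood edges x (pvBfsLoop (pvBuildDict edges) fuel que visited) := by
  intro fuel
  induction fuel with
  | zero =>
      intro que visited h1 h2 hx h3 h4 h5 hfuel
      have hq : que = [] := List.length_eq_zero_iff.1 (by omega)
      subst hq
      simp only [pvBfsLoop]
      exact ⟨h1, hx, h3, fun u hu w haw => h4 u hu (by simp) w haw⟩
  | succ f ih =>
      intro que visited h1 h2 hx h3 h4 h5 hfuel
      cases que with
      | nil =>
          simp only [pvBfsLoop]
          exact ⟨h1, hx, h3, fun u hu w haw => h4 u hu (by simp) w haw⟩
      | cons q qt =>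
          obtain ⟨nw, e1, e2, e3, e4, e5⟩ :=
            pvBfsStep_spec ((pvBuildDict edges).getD q []) visited qt
          have hqv : q ∈ visited := h2 q (by simp)
          simp only [pvBfsLoop]
          rw [e1, e2]
          have n1 : (visited ++ nw).Nodup :=
            List.Nodup.append h1 e3 (fun a ha hna => (e4 a hna).2 ha)
          have hcap : (visited ++ nw).length ≤ pvCap x edges := by
            apply pvNodup_card_le n1
            intro v hv
            rcases List.mem_append.1 hv with hv | hv
            · exact h5 v hv
            · exact List.mem_cons_of_mem _ (pvAdj_mem_eps (pvDict_getD_mem.1 (e4 v hv).1))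
          apply ih
          · exact n1
          · intro p hp
            rcases List.mem_append.1 hp with hp | hp
            · exact List.mem_append_left _ (h2 p (List.mem_cons_of_mem _ hp))
            · exact List.mem_append_right _ hp
          · exact List.mem_append_left _ hx
          · intro v hv
            rcases List.mem_append.1 hv with hv | hv
            · exact h3 v hv
            · exact (h3 q hqv).tail (pvDict_getD_mem.1 (e4 v hv).1)
          · intro u hu hnq w haw
            rcases List.mem_append.1 hu with hu | hu
            · by_cases huq : u = q
              · subst huq
                exact e5 w (pvDict_getD_mem.2 haw)
              · have hu_notqt : u ∉ qt := fun h => hnq (List.mem_append_left _ h)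
                exact List.mem_append_left _
                  (h4 u hu (by simp [List.mem_cons, huq, hu_notqt]) w haw)
            · exact absurd (List.mem_append_right _ hu) hnq
          · intro v hv
            rcases List.mem_append.1 hv with hv | hv
            · exact h5 v hv
            · exact List.mem_cons_of_mem _ (pvAdj_mem_eps (pvDict_getD_mem.1 (e4 v hv).1))
          · have hvl : visited.length ≤ pvCap x edges := pvNodup_card_le h1 h5
            simp only [List.length_append, List.length_cons] at *
            omega

-- saturation lemmas
def pvNewF (comp acc : PySem.Set Int) (ab : Int × Int) : PySem.Set Int :=
  let acc1 := if ab.1 ∈ comp ∧ ab.2 ∉ comp then PySem.Set.add acc ab.2 else acc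
  if ab.2 ∈ comp ∧ ab.1 ∉ comp then PySem.Set.add acc1 ab.1 else acc1

lemma pvNewNodes_eq (comp : PySem.Set Int) (edges : List (Int × Int)) :
    pvNewNodes comp edges = edges.foldl (pvNewF comp) PySem.Set.empty := rfl

lemma pvNewF_mem (comp acc : PySem.Set Int) (ab : Int × Int) (w : Int) :
    w ∈ pvNewF comp acc ab ↔ w ∈ acc ∨ (ab.1 ∈ comp ∧ ab.2 ∉ comp ∧ w = ab.2) ∨
      (ab.2 ∈ comp ∧ ab.1 ∉ comp ∧ w = ab.1) := by
  by_cases h1 : ab.1 ∈ comp ∧ ab.2 ∉ comp <;>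
    by_cases h2 : ab.2 ∈ comp ∧ ab.1 ∉ comp <;>
      simp [pvNewF, h1, h2, PySem.Set.mem_add] <;> tauto

lemma pvNewF_nodup {acc : PySem.Set Int} (comp : PySem.Set Int) (ab : Int × Int)
    (h : acc.Nodup) : (pvNewF comp acc ab).Nodup := by
  unfold pvNewF
  split_ifs <;>
    first
      | exact PySem.Set.nodup_add _ _ (PySem.Set.nodup_add _ _ h)
      | exact PySem.Set.nodup_add _ _ h
      | exact h

lemma pvNewNodesAux (comp : PySem.Set Int) (edges : List (Int × Int)) :
    ∀ (acc : PySem.Set Int), acc.Nodup →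
      (edges.foldl (pvNewF comp) acc).Nodup ∧
      ∀ w, w ∈ edges.foldl (pvNewF comp) acc ↔
        w ∈ acc ∨ (w ∉ comp ∧ ∃ u ∈ comp, pvAdj edges u w) := by
  induction edges with
  | nil => intro acc hacc; exact ⟨hacc, fun w => by simp [pvAdj]⟩
  | cons ab t ih =>
      obtain ⟨a, b⟩ := ab
      intro acc hacc
      rw [List.foldl_cons]
      obtain ⟨hnd, hmem⟩ := ih (pvNewF comp acc (a, b)) (pvNewF_nodup comp (a, b) hacc)
      refine ⟨hnd, fun w => ?_⟩
      rw [hmem w, pvNewF_mem]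
      simp only [pvAdj, List.mem_cons, Prod.mk.injEq]
      constructor
      · rintro ((hw | ⟨ha, hb, rfl⟩ | ⟨ha, hb, rfl⟩) | ⟨hwc, u, hu, hadj⟩)
        · exact Or.inl hw
        · exact Or.inr ⟨hb, a, ha, Or.inl (Or.inl ⟨rfl, rfl⟩)⟩
        · exact Or.inr ⟨hb, b, ha, Or.inr (Or.inl ⟨rfl, rfl⟩)⟩
        · rcases hadj with h | h
          · exact Or.inr ⟨hwc, u, hu, Or.inl (Or.inr h)⟩
          · exact Or.inr ⟨hwc, u, hu, Or.inr (Or.inr h)⟩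
      · rintro (hw | ⟨hwc, u, hu, (⟨rfl, rfl⟩ | hut) | (⟨rfl, rfl⟩ | hwu)⟩)
        · exact Or.inl (Or.inl hw)
        · exact Or.inl (Or.inr (Or.inl ⟨hu, hwc, rfl⟩))
        · exact Or.inr ⟨hwc, u, hu, Or.inl hut⟩
        · exact Or.inl (Or.inr (Or.inr ⟨hu, hwc, rfl⟩))
        · exact Or.inr ⟨hwc, u, hu, Or.inr hwu⟩

lemma pvNewNodes_spec (comp : PySem.Set Int) (edges : List (Int × Int)) :
    (pvNewNodes comp edges).Nodup ∧
    ∀ w, w ∈ pvNewNodes comp edges ↔ (w ∉ comp ∧ ∃ u ∈ comp, pvAdj edges u w) := by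
  obtain ⟨h1, h2⟩ := pvNewNodesAux comp edges PySem.Set.empty List.nodup_nil
  rw [pvNewNodes_eq]
  exact ⟨h1, fun w => by rw [h2 w]; simp [PySem.Set.empty]⟩

lemma pvAdd_not_mem (s : PySem.Set Int) (a : Int) (h : a ∉ s) :
    PySem.Set.add s a = s ++ [a] := by
  simp [PySem.Set.add, h]

lemma pvUnion_append (nw : PySem.Set Int) : ∀ (comp : PySem.Set Int), nw.Nodup →
    (∀ a ∈ nw, a ∉ comp) → PySem.Set.union comp nw = comp ++ nw := by
  induction nw with
  | nil =>
      intro comp _ _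
      show List.foldl PySem.Set.add comp [] = comp ++ []
      simp
  | cons a t ih =>
      intro comp hnd hd
      have ha : a ∉ comp := hd a (by simp)
      show List.foldl PySem.Set.add comp (a :: t) = comp ++ a :: t
      rw [List.foldl_cons, pvAdd_not_mem comp a ha]
      have ht : PySem.Set.union (comp ++ [a]) t = (comp ++ [a]) ++ t := by
        apply ih (comp ++ [a]) (List.nodup_cons.1 hnd).2
        intro b hb hbc
        rcases List.mem_append.1 hbc with h | h
        · exact hd b (List.mem_cons_of_mem _ hb) h
        · have hba : b = a := by simpa using h
          exact (List.nodup_cons.1 hnd).1 (hba ▸ hb)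
      rw [show List.foldl PySem.Set.add (comp ++ [a]) t
            = PySem.Set.union (comp ++ [a]) t from rfl, ht]
      simp

lemma pvSat_good (edges : List (Int × Int)) (x : Int) :
    ∀ (fuel : Nat) (comp : PySem.Set Int),
      comp.Nodup → x ∈ comp → (∀ v ∈ comp, pvReach edges x v) →
      (∀ v ∈ comp, v ∈ x :: pvEps edges) →
      (pvCap x edges - comp.length) + 1 ≤ fuel →
      pvGood edges x (pvSatLoop edges fuel comp) := by
  intro fuel
  induction fuel with
  | zero => intro comp _ _ _ _ hf; omega
  | succ f ih =>
      intro comp h1 hx h3 h5 hf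
      obtain ⟨hnwnd, hnwmem⟩ := pvNewNodes_spec comp edges
      by_cases hempty : pvNewNodes comp edges = PySem.Set.empty
      · simp only [pvSatLoop, if_pos hempty]
        refine ⟨h1, hx, h3, ?_⟩
        intro u hu w haw
        by_cases hw : w ∈ comp
        · exact hw
        · exfalso
          have hmem : w ∈ pvNewNodes comp edges := (hnwmem w).2 ⟨hw, u, hu, haw⟩
          rw [hempty] at hmem
          simp [PySem.Set.empty] at hmem
      · simp only [pvSatLoop, if_neg hempty]
        have hdisj : ∀ a ∈ pvNewNodes comp edges, a ∉ comp := fun a ha => ((hnwmem a).1 ha).1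
        rw [pvUnion_append _ _ hnwnd hdisj]
        have hne : pvNewNodes comp edges ≠ [] := fun h => hempty (by rw [h]; rfl)
        have hlen1 : 1 ≤ (pvNewNodes comp edges).length := by
          cases hh : pvNewNodes comp edges with
          | nil => exact absurd hh hne
          | cons c cs => simp
        have hnodup : (comp ++ pvNewNodes comp edges).Nodup :=
          List.Nodup.append h1 hnwnd (fun a ha hna => hdisj a hna ha)
        have hcap : (comp ++ pvNewNodes comp edges).length ≤ pvCap x edges := by
          apply pvNodup_card_le hnodup
          intro v hv
          rcases List.mem_append.1 hv with hv | hv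
          · exact h5 v hv
          · obtain ⟨-, u, hu, hadj⟩ := (hnwmem v).1 hv
            exact List.mem_cons_of_mem _ (pvAdj_mem_eps hadj)
        apply ih
        · exact hnodup
        · exact List.mem_append_left _ hx
        · intro v hv
          rcases List.mem_append.1 hv with hv | hv
          · exact h3 v hv
          · obtain ⟨-, u, hu, hadj⟩ := (hnwmem v).1 hv
            exact (h3 u hu).tail hadj
        · intro v hv
          rcases List.mem_append.1 hv with hv | hv
          · exact h5 v hv
          · obtain ⟨-, u, hu, hadj⟩ := (hnwmem v).1 hv
            exact List.mem_cons_of_mem _ (pvAdj_mem_eps hadj)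
        · simp only [List.length_append] at *
          omega

-- the per-removed-edge equality
lemma pvPer_edge (x : Int) (edges : List (Int × Int)) :
    pvFunc x (pvBuildDict edges) (1 + 2 * edges.length) = pvCompSize x edges := by
  have hcap : pvCap x edges ≤ 1 + 2 * edges.length := by
    have h1 := List.toFinset_card_le (x :: pvEps edges)
    have h2 := pvLength_eps edges
    simp only [List.length_cons] at h1
    unfold pvCap
    omega
  by_cases hx : x ∈ pvEps edges
  · have hc : (pvBuildDict edges).contains x = true := pvDict_contains.2 hx
    have hVgood : pvGood edges x
        (pvBfsLoop (pvBuildDict edges) (1 + 2 * edges.length) [x] [x]) := by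
      apply pvBfs_good
      · simp
      · simp
      · simp
      · intro v hv; simp only [List.mem_singleton] at hv; subst hv
        exact Relation.ReflTransGen.refl
      · intro u hu hnq w haw
        simp only [List.mem_singleton] at hu hnq
        exact absurd hu hnq
      · intro v hv; simp only [List.mem_singleton] at hv; subst hv; simp
      · simp only [List.length_cons, List.length_nil]
        omega
    have hCgood : pvGood edges x
        (pvSatLoop edges (2 * edges.length + 1) (PySem.Set.ofList [x])) := by
      show pvGood edges x (pvSatLoop edges (2 * edges.length + 1) [x])
      apply pvSat_good
      · simp
      · simp
      · intro v hv; simp only [List.mem_singleton] at hv; subst hv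
        exact Relation.ReflTransGen.refl
      · intro v hv; simp only [List.mem_singleton] at hv; subst hv; simp
      · simp only [List.length_singleton]
        omega
    simp only [pvFunc, pvCompSize, hc]
    norm_num
    exact_mod_cast pvGood_length_eq hVgood hCgood
  · have hc : (pvBuildDict edges).contains x = false := by
      rcases h : (pvBuildDict edges).contains x
      · rfl
      · exact absurd (pvDict_contains.1 h) hx
    have hempty : pvNewNodes (PySem.Set.ofList [x]) edges = PySem.Set.empty := by
      have hsp := (pvNewNodes_spec (PySem.Set.ofList [x]) edges).2
      have h0 : ∀ w, w ∉ pvNewNodes (PySem.Set.ofList [x]) edges := by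
        intro w hw
        obtain ⟨-, u, hu, hadj⟩ := (hsp w).1 hw
        have hux : u = x := by simpa using hu
        subst hux
        exact hx (pvAdj_mem_eps_left hadj)
      exact List.eq_nil_iff_forall_not_mem.2 h0
    simp [pvFunc, pvCompSize, hc, pvSatLoop, hempty]
    rfl

-- outer loop
lemma pvPop_at (prev rem : List (Int × Int)) (e : Int × Int) :
    PySem.List.pop? (prev ++ e :: rem) (prev.length : Int) = some (e, prev ++ rem) := by
  have h : prev.length < (prev ++ e :: rem).length := by simp
  rw [PySem.List.pop?_natCast _ _ h]
  have h1 : (prev ++ e :: rem)[prev.length] = e := by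
    rw [List.getElem_append_right (le_refl _)]
    simp
  have h2 : (prev ++ e :: rem).eraseIdx prev.length = prev ++ rem := by
    rw [List.eraseIdx_append_of_length_le (le_refl _)]
    simp
  rw [h1, h2]

lemma pvOuter (wires : List (Int × Int)) :
    ∀ (rem prev : List (Int × Int)) (best : Int), wires = prev ++ rem →
      pvAltLoop best prev rem = (List.range' prev.length rem.length).foldl
        (fun (answer : Int) (k : Nat) =>
          match PySem.List.pop? wires (k : Int) with
          | none => answer
          | some ((x, y), temp) =>
              let dict := pvBuildDict temp
              if |pvFunc x dict (1 + 2 * temp.length) - pvFunc y dict (1 + 2 * temp.length)| < answer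
              then |pvFunc x dict (1 + 2 * temp.length) - pvFunc y dict (1 + 2 * temp.length)|
              else answer) best := by
  intro rem
  induction rem with
  | nil =>
      intro prev best hw
      simp [pvAltLoop]
  | cons e t ih =>
      intro prev best hw
      obtain ⟨x, y⟩ := e
      have hpop : PySem.List.pop? wires ((prev.length : Nat) : Int)
          = some ((x, y), prev ++ t) := by
        rw [hw]; exact pvPop_at prev t (x, y)
      simp only [pvAltLoop]
      rw [ih (prev ++ [(x, y)]) _ (by rw [hw]; simp)]
      simp only [List.length_cons]
      rw [List.range'_succ, List.foldl_cons]
      simp only [hpop]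
      rw [pvPer_edge x (prev ++ t), pvPer_edge y (prev ++ t)]
      simp [List.length_append]

-- ===== VERDICT (by name: the statement is the Claim_ definition above) =====
theorem solution_spec : Claim_equal_solution := by
  intro n wires _
  show solution n wires = solution_alt n wires
  unfold solution solution_alt
  rw [PySem.List.pyRange_zero_natCast, List.foldl_map, List.range_eq_range']
  exact (pvOuter wires wires [] n rfl).symm
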